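-- pv_equiv track=rewrite | github.com/bogdanmatara/service.kodilive.translator.ai | srt_utils.py | split_srt
-- ===== SOURCE A (Python) =====
-- def split_srt(content, max_lines=50):
--     """
--     Splits the SRT into chunks.
--     Gemini 2.0 Flash can handle 100+ lines easily.
--     """
--     lines = content.splitlines(True)
--     chunks = []
--     current_chunk = []
--     line_count = 0
--
--     for line in lines:
--         current_chunk.append(line)
--         # Split at blank lines to ensure we don't break a subtitle block
--         if line.strip() == "":
--             line_count += 1
--             if line_count >= max_lines:
--                 chunks.append("".join(current_chunk))
--                 current_chunk = []
--                 line_count = 0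
--
--     if current_chunk:
--         chunks.append("".join(current_chunk))
--     return chunks
-- ===== SOURCE B (Python) =====
-- def split_srt(content, max_lines=50):
--     """
--     Splits the SRT into chunks.
--     Index-based re-implementation: first locate all blank lines, then slice
--     the line list at every max_lines-th blank (max_lines below 1 acts as 1).
--     """
--     lines = content.splitlines(True)
--     step = max_lines if max_lines > 1 else 1
--     blanks = [i for i, l in enumerate(lines) if l.strip() == ""]
--     chunks = []
--     start = 0
--     for k, c in enumerate(blanks):
--         if k % step == step - 1:
--             chunks.append("".join(lines[start:c + 1]))
--             start = c + 1
--     if start < len(lines):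
--         chunks.append("".join(lines[start:]))
--     return chunks
-- ===== Notes on version B (the rewrite author's own statement) =====
-- stated objective: alternative
-- what changed: B first builds the list of blank-line indices and slices the original line list at every max_lines-th blank, instead of A's single pass that appends lines to a growing chunk while counting blanks and flushing.
import Mathlib
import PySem

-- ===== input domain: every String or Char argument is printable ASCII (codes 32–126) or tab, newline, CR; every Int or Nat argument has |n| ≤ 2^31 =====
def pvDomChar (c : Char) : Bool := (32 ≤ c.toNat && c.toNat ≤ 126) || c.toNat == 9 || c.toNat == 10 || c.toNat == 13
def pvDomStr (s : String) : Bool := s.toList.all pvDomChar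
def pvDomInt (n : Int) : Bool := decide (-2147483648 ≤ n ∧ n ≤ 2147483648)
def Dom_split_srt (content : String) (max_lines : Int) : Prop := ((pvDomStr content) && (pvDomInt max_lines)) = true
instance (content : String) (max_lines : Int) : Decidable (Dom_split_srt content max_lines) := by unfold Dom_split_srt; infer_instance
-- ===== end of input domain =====

-- B re-implements the chunking by first indexing all blank lines and slicing the
-- line list at every max_lines-th blank, instead of A's accumulate-and-count pass;
-- objective: alternative decomposition (same asymptotic cost).

-- shared helper: content.splitlines(True) (keepends). Exact for strings whose
-- characters are printable ASCII / tab / newline / CR (the Dom): the only line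
-- boundaries there are '\n', '\r' and '\r\n'.
def pvLinesKeep : List Char → List Char → List (List Char)
  | [], acc => if acc = [] then [] else [acc.reverse]
  | '\r' :: '\n' :: rest, acc => (acc.reverse ++ ['\r', '\n']) :: pvLinesKeep rest []
  | '\r' :: rest, acc => (acc.reverse ++ ['\r']) :: pvLinesKeep rest []
  | '\n' :: rest, acc => (acc.reverse ++ ['\n']) :: pvLinesKeep rest []
  | c :: rest, acc => pvLinesKeep rest (c :: acc)

def pvFinA (st : List (List Char) × List (List Char) × Int) : List (List Char) :=
  if st.2.1 ≠ [] then st.1 ++ [PySem.Chars.join [] st.2.1] else st.1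

-- ===== PORT A =====
-- loop body of A: append the line to the current chunk; on a blank line bump the
-- counter and flush when it reaches max_lines
def pvStepA (max_lines : Int) (st : List (List Char) × List (List Char) × Int) (line : List Char) :
    List (List Char) × List (List Char) × Int :=
  if PySem.Chars.strip line = [] then
    if st.2.2 + 1 ≥ max_lines then
      (st.1 ++ [PySem.Chars.join [] (st.2.1 ++ [line])], ([] : List (List Char)), (0 : Int))
    else (st.1, st.2.1 ++ [line], st.2.2 + 1)
  else (st.1, st.2.1 ++ [line], st.2.2)

def split_srt (content : String) (max_lines : Int) : List String :=
  let lines := pvLinesKeep content.toList []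
  (pvFinA (lines.foldl (pvStepA max_lines) ([], [], 0))).map String.ofList

def pvFinB (lines : List (List Char)) (st : List (List Char) × Int) : List (List Char) :=
  if st.2 < (lines.length : Int) then st.1 ++ [PySem.Chars.join [] (PySem.List.slice lines (some st.2) none)] else st.1

-- ===== PORT B =====
-- loop body of B: over enumerate(blanks); at every step-th blank index c slice
-- lines[start:c+1] and move start past it
def pvStepB (lines : List (List Char)) (step : Int) (st : List (List Char) × Int) (kc : Int × Int) :
    List (List Char) × Int :=
  if PySem.Int.mod kc.1 step = step - 1 then
    (st.1 ++ [PySem.Chars.join [] (PySem.List.slice lines (some st.2) (some (kc.2 + 1)))], kc.2 + 1)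
  else st

def split_srt_alt (content : String) (max_lines : Int) : List String :=
  let lines := pvLinesKeep content.toList []
  let step := if max_lines > 1 then max_lines else 1
  let blanks := ((PySem.List.enumerate lines 0).filter (fun p => decide (PySem.Chars.strip p.2 = []))).map (·.1)
  (pvFinB lines ((PySem.List.enumerate blanks 0).foldl (pvStepB lines step) ([], 0))).map String.ofList

-- ===== PRECONDITION & SPEC =====
def Spec_split_srt (content : String) (max_lines : Int) (out : List String) : Prop := out = split_srt_alt content max_lines
instance (content : String) (max_lines : Int) (out : List String) : Decidable (Spec_split_srt content max_lines out) := by unfold Spec_split_srt; infer_instance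

-- ===== CLAIM (what is proved, stated in full; the proofs are below) =====
def Claim_equal_split_srt : Prop := ∀ (content : String) (max_lines : Int), Dom_split_srt content max_lines → Spec_split_srt content max_lines (split_srt content max_lines)

-- ===== LEMMAS AND PROOFS =====

theorem pvJoinNil (parts : List (List Char)) : PySem.Chars.join [] parts = parts.flatten := by
  induction parts with
  | nil => rfl
  | cons a l ih =>
    cases l with
    | nil => simp [PySem.Chars.join, List.intercalate]
    | cons b t => simp_all [PySem.Chars.join, List.intercalate, List.intersperse]

-- common reference: A's recursion with a Nat blank counter, chunks kept as line lists
def pvAux (m : Nat) : List (List Char) → Nat → List (List Char) → List (List (List Char))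
  | [], _, cur => if cur = [] then [] else [cur]
  | l :: ls, cnt, cur =>
    if PySem.Chars.strip l = [] then
      if m ≤ cnt + 1 then (cur ++ [l]) :: pvAux m ls 0 []
      else pvAux m ls (cnt + 1) (cur ++ [l])
    else pvAux m ls cnt (cur ++ [l])

theorem pvFoldA (max_lines : Int) (m : Nat)
    (hm : ∀ n : Nat, ((n : Int) + 1 ≥ max_lines ↔ m ≤ n + 1)) :
    ∀ (ls : List (List Char)) (chunks cur : List (List Char)) (n : Nat),
      pvFinA (ls.foldl (pvStepA max_lines) (chunks, cur, (n : Int)))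
      = chunks ++ (pvAux m ls n cur).map List.flatten := by
  intro ls
  induction ls with
  | nil =>
    intro chunks cur n
    by_cases h : cur = [] <;> simp [pvFinA, pvAux, h, pvJoinNil]
  | cons l ls ih =>
    intro chunks cur n
    rw [List.foldl_cons]
    by_cases hb : PySem.Chars.strip l = []
    · by_cases hc : (n : Int) + 1 ≥ max_lines
      · have hm' : m ≤ n + 1 := (hm n).mp hc
        have e : pvStepA max_lines (chunks, cur, (n : Int)) l
            = (chunks ++ [PySem.Chars.join [] (cur ++ [l])], [], ((0 : Nat) : Int)) := by
          simp [pvStepA, hb, hc]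
        rw [e, ih]
        simp [pvAux, hb, hm', pvJoinNil]
      · have hm' : ¬ m ≤ n + 1 := fun h => hc ((hm n).mpr h)
        have e : pvStepA max_lines (chunks, cur, (n : Int)) l
            = (chunks, cur ++ [l], ((n + 1 : Nat) : Int)) := by
          simp [pvStepA, hb, hc]
        rw [e, ih]
        simp [pvAux, hb, hm']
    · have e : pvStepA max_lines (chunks, cur, (n : Int)) l = (chunks, cur ++ [l], (n : Int)) := by
        simp [pvStepA, hb]
      rw [e, ih]
      simp [pvAux, hb]

-- B's loop over enumerate(blanks) as structural recursion over the blank indices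
def pvBgo (lines : List (List Char)) (step : Int) : Int → Int → List (List Char) → List Int → List (List Char) × Int
  | _, s, ch, [] => (ch, s)
  | k, s, ch, c :: bs =>
    if PySem.Int.mod k step = step - 1 then
      pvBgo lines step (k + 1) (c + 1) (ch ++ [PySem.Chars.join [] (PySem.List.slice lines (some s) (some (c + 1)))]) bs
    else pvBgo lines step (k + 1) s ch bs

theorem pvFoldB (lines : List (List Char)) (step : Int) :
    ∀ (bs : List Int) (k s : Int) (ch : List (List Char)),
      (PySem.List.enumerate bs k).foldl (pvStepB lines step) (ch, s) = pvBgo lines step k s ch bs := by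
  intro bs
  induction bs with
  | nil => intro k s ch; simp [PySem.List.enumerate_nil, pvBgo]
  | cons c bs ih =>
    intro k s ch
    rw [PySem.List.enumerate_cons]
    simp only [List.foldl_cons, pvStepB, pvBgo]
    split <;> exact ih _ _ _

def pvCnt (ls : List (List Char)) : Nat := ls.countP (fun l => decide (PySem.Chars.strip l = []))

theorem pvSliceChunk (pre ls : List (List Char)) (l : List Char) (sn : Nat) (h : sn ≤ pre.length) :
    PySem.List.slice (pre ++ l :: ls) (some (sn : Int)) (some ((pre.length : Int) + 1)) = pre.drop sn ++ [l] := by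
  have h1 : ((pre.length : Int) + 1) = ((pre.length + 1 : Nat) : Int) := by push_cast; ring
  rw [h1, PySem.List.slice_natCast]
  rw [List.drop_append_of_le_length h, List.take_append]
  rw [List.take_of_length_le (by simp; omega)]
  have h2 : pre.length + 1 - sn - (List.drop sn pre).length = 1 := by simp; omega
  rw [h2]
  rfl

theorem pvModSuccZero (c m : Nat) (hm : 1 ≤ m) (h : c % m = m - 1) : (c + 1) % m = 0 := by
  have hd := Nat.div_add_mod c m
  have h2 : (c / m + 1) * m = m * (c / m) + m := by ring
  have h1 : c + 1 = (c / m + 1) * m := by omega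
  rw [h1, Nat.mul_mod_left]

theorem pvModSuccLt (c m : Nat) (hm : 1 ≤ m) (h : c % m ≠ m - 1) : (c + 1) % m = c % m + 1 := by
  have hd := Nat.div_add_mod c m
  have hlt : c % m < m := Nat.mod_lt _ (by omega)
  have h2 : c / m * m = m * (c / m) := by ring
  have h1 : c + 1 = c / m * m + (c % m + 1) := by omega
  rw [h1, Nat.mul_add_mod_self_right]
  exact Nat.mod_eq_of_lt (by omega)

theorem pvMain (step : Int) (hstep : 0 < step) (m : Nat) (hm : m = step.toNat) :
    ∀ (ls pre : List (List Char)) (kn sn : Nat) (ch : List (List Char)),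
      sn ≤ pre.length →
      pvCnt pre = kn →
      pvCnt (pre.drop sn) = kn % m →
      pvFinB (pre ++ ls)
        (pvBgo (pre ++ ls) step (kn : Int) (sn : Int) ch
          (((PySem.List.enumerate ls (pre.length : Int)).filter (fun p => decide (PySem.Chars.strip p.2 = []))).map (·.1)))
      = ch ++ (pvAux m ls (kn % m) (pre.drop sn)).map List.flatten := by
  have hm1 : 1 ≤ m := by omega
  intro ls
  induction ls with
  | nil =>
    intro pre kn sn ch hsn hkn hcur
    simp only [PySem.List.enumerate_nil, List.filter_nil, List.map_nil, pvBgo, List.append_nil, pvFinB]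
    by_cases hlt : sn < pre.length
    · rw [if_pos (by exact_mod_cast hlt)]
      have hne : pre.drop sn ≠ [] := by simp [List.drop_eq_nil_iff]; omega
      rw [PySem.List.slice_from_natCast]
      simp [pvAux, hne, pvJoinNil]
    · rw [if_neg (by exact_mod_cast hlt)]
      have hnil : pre.drop sn = [] := by rw [List.drop_eq_nil_iff]; omega
      simp [pvAux, hnil]
  | cons l ls ih =>
    intro pre kn sn ch hsn hkn hcur
    subst hkn
    rw [PySem.List.enumerate_cons]
    by_cases hb : PySem.Chars.strip l = []
    · have ef : List.filter (fun p => decide (PySem.Chars.strip p.2 = []))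
          (((pre.length : Int), l) :: PySem.List.enumerate ls ((pre.length : Int) + 1))
          = ((pre.length : Int), l) :: List.filter (fun p => decide (PySem.Chars.strip p.2 = []))
              (PySem.List.enumerate ls ((pre.length : Int) + 1)) := by
        simp [hb]
      rw [ef, List.map_cons]
      simp only [pvBgo]
      have hmodiff : (PySem.Int.mod ((pvCnt pre : Nat) : Int) step = step - 1) ↔ (pvCnt pre % m = m - 1) := by
        have hs : step = (m : Int) := by omega
        rw [PySem.Int.mod_eq_emod_of_pos hstep, hs, ← Int.natCast_mod]
        have hlt : pvCnt pre % m < m := Nat.mod_lt _ (by omega)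
        omega
      have e1 : ((pvCnt pre : Nat) : Int) + 1 = ((pvCnt pre + 1 : Nat) : Int) := by push_cast; ring
      have e2 : (pre.length : Int) + 1 = (((pre ++ [l]).length : Nat) : Int) := by simp
      have e3 : pre ++ l :: ls = (pre ++ [l]) ++ ls := by simp
      have hc1 : pvCnt (pre ++ [l]) = pvCnt pre + 1 := by
        simp [pvCnt, List.countP_append, hb]
      by_cases hcut : pvCnt pre % m = m - 1
      · rw [if_pos (hmodiff.mpr hcut)]
        rw [pvSliceChunk pre ls l sn hsn]
        have hz : (pvCnt pre + 1) % m = 0 := pvModSuccZero _ _ hm1 hcut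
        rw [e1, e2, e3]
        rw [ih (pre ++ [l]) (pvCnt pre + 1) (pre ++ [l]).length _ le_rfl hc1
          (by rw [List.drop_length, hz]; rfl)]
        have hge : m ≤ pvCnt pre % m + 1 := by omega
        simp [pvAux, hb, hge, pvJoinNil, hz]
      · rw [if_neg (fun h => hcut (hmodiff.mp h))]
        have hmod : pvCnt pre % m < m := Nat.mod_lt _ (by omega)
        have hstepmod : (pvCnt pre + 1) % m = pvCnt pre % m + 1 := pvModSuccLt _ _ hm1 hcut
        rw [e1, e2, e3]
        have happ : pvCnt (List.drop sn pre ++ [l]) = pvCnt (List.drop sn pre) + 1 := by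
          simp [pvCnt, List.countP_append, hb]
        rw [ih (pre ++ [l]) (pvCnt pre + 1) sn ch (by simp; omega) hc1
          (by rw [List.drop_append_of_le_length hsn, happ, hcur, hstepmod])]
        have hlt : ¬ m ≤ pvCnt pre % m + 1 := by omega
        rw [List.drop_append_of_le_length hsn]
        simp [pvAux, hb, hlt, hstepmod]
    · have ef : List.filter (fun p => decide (PySem.Chars.strip p.2 = []))
          (((pre.length : Int), l) :: PySem.List.enumerate ls ((pre.length : Int) + 1))
          = List.filter (fun p => decide (PySem.Chars.strip p.2 = []))
              (PySem.List.enumerate ls ((pre.length : Int) + 1)) := by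
        simp [hb]
      rw [ef]
      have e2 : (pre.length : Int) + 1 = (((pre ++ [l]).length : Nat) : Int) := by simp
      have e3 : pre ++ l :: ls = (pre ++ [l]) ++ ls := by simp
      rw [e2, e3]
      have happ : pvCnt (List.drop sn pre ++ [l]) = pvCnt (List.drop sn pre) := by
        simp [pvCnt, List.countP_append, hb]
      rw [ih (pre ++ [l]) (pvCnt pre) sn ch (by simp; omega)
        (by simp [pvCnt, List.countP_append, hb])
        (by rw [List.drop_append_of_le_length hsn, happ, hcur])]
      rw [List.drop_append_of_le_length hsn]
      simp [pvAux, hb]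

-- ===== VERDICT (by name: the statement is the Claim_ definition above) =====
theorem split_srt_spec : Claim_equal_split_srt := by
  intro content max_lines _
  have hsteppos : 0 < (if max_lines > 1 then max_lines else 1) := by split <;> omega
  have hm : ∀ n : Nat, ((n : Int) + 1 ≥ max_lines ↔ (if max_lines > 1 then max_lines else 1).toNat ≤ n + 1) := by
    intro n; split <;> omega
  show List.map String.ofList (pvFinA ((pvLinesKeep content.toList []).foldl (pvStepA max_lines) ([], [], 0)))
     = List.map String.ofList (pvFinB (pvLinesKeep content.toList [])
        ((PySem.List.enumerate
            (((PySem.List.enumerate (pvLinesKeep content.toList []) 0).filter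
                (fun p => decide (PySem.Chars.strip p.2 = []))).map (·.1)) 0).foldl
          (pvStepB (pvLinesKeep content.toList []) (if max_lines > 1 then max_lines else 1)) ([], 0)))
  generalize pvLinesKeep content.toList [] = lines
  congr 1
  rw [show (([], [], 0) : List (List Char) × List (List Char) × Int) = ([], [], ((0 : Nat) : Int)) from by norm_num]
  rw [pvFoldA max_lines _ hm lines [] [] 0]
  rw [pvFoldB lines (if max_lines > 1 then max_lines else 1) _ 0 0 []]
  have := pvMain (if max_lines > 1 then max_lines else 1) hsteppos _ rfl lines [] 0 0 []
    (by simp) (by simp [pvCnt]) (by simp [pvCnt])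
  simp only [List.nil_append, List.drop_nil, List.length_nil, Nat.cast_zero, Nat.zero_mod] at this
  rw [List.nil_append, ← this]
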